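-- pv_equiv track=rewrite | github.com/danilobatson/ai-health-screening | ml_services/health_ml_service.py | _extract_primary_symptom
-- ===== SOURCE A (Python) =====
-- def _extract_primary_symptom(symptoms_text: str) -> str:
--     """Extract primary symptom from text description"""
--     symptoms_text = symptoms_text.lower()
--     common_symptoms = [
--         "chest pain",
--         "shortness of breath",
--         "dizziness",
--         "headache",
--         "nausea",
--         "fatigue",
--         "fever",
--         "cough",
--         "abdominal pain",
--     ]
--
--     # Check for specific symptoms in order of priority
--     if "dizzy" in symptoms_text or "dizziness" in symptoms_text:
--         return "dizziness"
--     elif "chest pain" in symptoms_text: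
--         return "chest pain"
--     elif "headache" in symptoms_text or "head" in symptoms_text:
--         return "headache"
--
--     for symptom in common_symptoms:
--         if symptom in symptoms_text:
--             return symptom
--     return "fatigue"  # Default fallback
-- ===== SOURCE B (Python) =====
-- PATTERNS = [
--     ("dizzy", "dizziness"),
--     ("dizziness", "dizziness"),
--     ("chest pain", "chest pain"),
--     ("head", "headache"),
--     ("shortness of breath", "shortness of breath"),
--     ("nausea", "nausea"),
--     ("fatigue", "fatigue"),
--     ("fever", "fever"),
--     ("cough", "cough"),
--     ("abdominal pain", "abdominal pain"),
-- ]
--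
--
-- def _extract_primary_symptom(symptoms_text: str) -> str:
--     # Single left-to-right scan of the text: at each position, see which
--     # patterns start there and keep the best (lowest) priority seen so far.
--     text = symptoms_text.lower()
--     best = len(PATTERNS)  # sentinel: nothing matched yet
--     for i in range(len(text)):
--         for k, (pattern, _label) in enumerate(PATTERNS):
--             if text.startswith(pattern, i):
--                 best = min(best, k)
--     return PATTERNS[best][1] if best < len(PATTERNS) else "fatigue"
-- ===== Notes on version B (the rewrite author's own statement) =====
-- stated objective: alternative
-- what changed: Instead of A's priority-ordered chain of whole-text substring searches ('pattern in text' per branch plus a loop), B makes a single left-to-right scan over the text positions, checks at each position which rule patterns start there, and keeps the minimal matched priority index into one rule table; the answer is that table entry's label (sentinel -> 'fatigue').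
import Mathlib
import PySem

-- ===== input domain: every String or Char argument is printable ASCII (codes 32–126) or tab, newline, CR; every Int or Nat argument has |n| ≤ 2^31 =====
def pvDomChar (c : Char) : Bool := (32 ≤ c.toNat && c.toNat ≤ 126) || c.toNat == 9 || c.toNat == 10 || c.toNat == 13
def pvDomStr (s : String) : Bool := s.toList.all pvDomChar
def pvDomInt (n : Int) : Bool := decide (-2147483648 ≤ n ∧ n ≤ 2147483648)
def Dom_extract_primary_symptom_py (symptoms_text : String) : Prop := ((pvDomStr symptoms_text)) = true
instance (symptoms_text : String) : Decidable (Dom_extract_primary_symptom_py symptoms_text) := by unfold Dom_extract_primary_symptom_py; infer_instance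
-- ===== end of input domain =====

-- B replaces A's priority chain of substring searches by a single left-to-right positional scan
-- of the text keeping the minimal matched priority (objective: alternative).


-- ===== PORT A =====
def extract_primary_symptom_py (symptoms_text : String) : String :=
  -- symptoms_text = symptoms_text.lower()
  let t := PySem.Str.lower symptoms_text
  let common_symptoms : List String :=
    ["chest pain", "shortness of breath", "dizziness", "headache", "nausea",
     "fatigue", "fever", "cough", "abdominal pain"]
  if PySem.Str.isIn "dizzy" t || PySem.Str.isIn "dizziness" t then "dizziness"
  else if PySem.Str.isIn "chest pain" t then "chest pain"
  else if PySem.Str.isIn "headache" t || PySem.Str.isIn "head" t then "headache"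
  else
    -- for symptom in common_symptoms: if symptom in symptoms_text: return symptom
    (common_symptoms.find? (fun symptom => PySem.Str.isIn symptom t)).getD "fatigue"

-- ===== PORT B =====
-- PATTERNS: (pattern, label) in priority order (index = priority)
def pvPatterns : List (String × String) :=
  [ ("dizzy", "dizziness"),
    ("dizziness", "dizziness"),
    ("chest pain", "chest pain"),
    ("head", "headache"),
    ("shortness of breath", "shortness of breath"),
    ("nausea", "nausea"),
    ("fatigue", "fatigue"),
    ("fever", "fever"),
    ("cough", "cough"),
    ("abdominal pain", "abdominal pain") ]

def extract_primary_symptom_py_alt (symptoms_text : String) : String :=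
  -- text = symptoms_text.lower()
  let tl : List Char := PySem.Chars.lower symptoms_text.toList
  -- best = len(PATTERNS); for i in range(len(text)): for k, (pattern, _) in enumerate(PATTERNS):
  --   if text.startswith(pattern, i): best = min(best, k)
  -- text.startswith(pattern, i) with 0 ≤ i ≤ len(text) is exactly: pattern is a prefix of text[i:]
  let best : Int := (List.range tl.length).foldl (fun best i =>
      (PySem.List.enumerate pvPatterns).foldl (fun b kp =>
        if PySem.Chars.startswith (tl.drop i) kp.2.1.toList then min b kp.1 else b) best)
    (pvPatterns.length : Int)
  -- return PATTERNS[best][1] if best < len(PATTERNS) else "fatigue"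
  if best < (pvPatterns.length : Int) then
    ((PySem.List.pyGet? pvPatterns best).map Prod.snd).getD "fatigue"
  else "fatigue"

-- ===== PRECONDITION & SPEC =====
def Spec_extract_primary_symptom_py (symptoms_text : String) (out : String) : Prop := out = extract_primary_symptom_py_alt symptoms_text
instance (symptoms_text : String) (out : String) : Decidable (Spec_extract_primary_symptom_py symptoms_text out) := by unfold Spec_extract_primary_symptom_py; infer_instance

-- ===== CLAIM (what is proved, stated in full; the proofs are below) =====
def Claim_equal_extract_primary_symptom_py : Prop := ∀ (symptoms_text : String), Dom_extract_primary_symptom_py symptoms_text → Spec_extract_primary_symptom_py symptoms_text (extract_primary_symptom_py symptoms_text)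

-- ===== LEMMAS AND PROOFS =====

-- the k-th pattern's boolean "occurs in tl" flag
def pvFlag (tl : List Char) (k : Nat) : Bool :=
  ((pvPatterns[k]?).map (fun e => PySem.Chars.isIn e.1.toList tl)).getD false

-- the first-match priority chain both programs compute
def pvChain (tl : List Char) : String :=
  if pvFlag tl 0 then "dizziness" else if pvFlag tl 1 then "dizziness"
  else if pvFlag tl 2 then "chest pain" else if pvFlag tl 3 then "headache"
  else if pvFlag tl 4 then "shortness of breath" else if pvFlag tl 5 then "nausea"
  else if pvFlag tl 6 then "fatigue" else if pvFlag tl 7 then "fever"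
  else if pvFlag tl 8 then "cough" else if pvFlag tl 9 then "abdominal pain"
  else "fatigue"

theorem head_of_headache (tl : List Char) (h : PySem.Chars.isIn "headache".toList tl = true) :
    PySem.Chars.isIn "head".toList tl = true := by
  rw [PySem.Chars.isIn_iff_infix] at *
  exact List.IsInfix.trans (by decide) h

theorem a_eq_chain (s : String) : extract_primary_symptom_py s = pvChain (PySem.Chars.lower s.toList) := by
  have hha := head_of_headache (PySem.Chars.lower s.toList)
  simp only [extract_primary_symptom_py, pvChain, pvFlag, pvPatterns, List.find?_cons, List.find?_nil,
    PySem.Str.isIn_eq, PySem.Str.toList_lower, List.getElem?_cons_zero, List.getElem?_cons_succ,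
    Option.map_some, Option.getD_some]
  generalize PySem.Chars.isIn "dizzy".toList (PySem.Chars.lower s.toList) = b0 at *
  generalize PySem.Chars.isIn "dizziness".toList (PySem.Chars.lower s.toList) = b1 at *
  generalize PySem.Chars.isIn "chest pain".toList (PySem.Chars.lower s.toList) = b2 at *
  generalize PySem.Chars.isIn "headache".toList (PySem.Chars.lower s.toList) = bhc at *
  generalize PySem.Chars.isIn "head".toList (PySem.Chars.lower s.toList) = b3 at *
  generalize PySem.Chars.isIn "shortness of breath".toList (PySem.Chars.lower s.toList) = b4 at *
  generalize PySem.Chars.isIn "nausea".toList (PySem.Chars.lower s.toList) = b5 at *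
  generalize PySem.Chars.isIn "fatigue".toList (PySem.Chars.lower s.toList) = b6 at *
  generalize PySem.Chars.isIn "fever".toList (PySem.Chars.lower s.toList) = b7 at *
  generalize PySem.Chars.isIn "cough".toList (PySem.Chars.lower s.toList) = b8 at *
  revert hha
  by_cases h9 : PySem.Chars.isIn "abdominal pain".toList (PySem.Chars.lower s.toList) = true
  · simp only [h9]
    revert b0 b1 b2 bhc b3 b4 b5 b6 b7 b8
    decide
  · simp only [Bool.not_eq_true] at h9
    simp only [h9]
    revert b0 b1 b2 bhc b3 b4 b5 b6 b7 b8
    decide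

-- the inner (per-position) fold of B's scan, over an arbitrary rule list
def pvInner (P : Int × (String × String) → Bool) (l : List (Int × (String × String))) (b : Int) : Int :=
  l.foldl (fun b kp => if P kp then min b kp.1 else b) b

-- the per-position match predicate of B at position i
def pvP (tl : List Char) (i : Nat) : Int × (String × String) → Bool :=
  fun kp => PySem.Chars.startswith (tl.drop i) kp.2.1.toList

-- B's scan result, written with pvInner
def pvBest (tl : List Char) : Int :=
  (List.range tl.length).foldl (fun b i => pvInner (pvP tl i) (PySem.List.enumerate pvPatterns) b)
    (pvPatterns.length : Int)

theorem pvInner_min (P : Int × (String × String) → Bool) (l : List (Int × (String × String)))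
    (b c : Int) : pvInner P l (min b c) = min b (pvInner P l c) := by
  induction l generalizing c with
  | nil => rfl
  | cons kp t ih =>
    simp only [pvInner, List.foldl_cons]
    by_cases h : P kp = true
    · rw [if_pos h, if_pos h, min_assoc]
      exact ih (min c kp.1)
    · rw [if_neg h, if_neg h]
      exact ih c

theorem pvInner_le (P : Int × (String × String) → Bool) (l : List (Int × (String × String)))
    (b : Int) : pvInner P l b ≤ b := by
  induction l generalizing b with
  | nil => exact le_refl b
  | cons kp t ih =>
    simp only [pvInner, List.foldl_cons]
    refine le_trans (ih _) ?_
    by_cases h : P kp = true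
    · rw [if_pos h]; exact min_le_left _ _
    · rw [if_neg h]

theorem pvInner_le_of_mem (P : Int × (String × String) → Bool) (l : List (Int × (String × String)))
    (b : Int) (kp : Int × (String × String)) (hmem : kp ∈ l) (hP : P kp = true) :
    pvInner P l b ≤ kp.1 := by
  induction l generalizing b with
  | nil => cases hmem
  | cons a t ih =>
    simp only [pvInner, List.foldl_cons]
    rcases List.mem_cons.mp hmem with rfl | hmem'
    · refine le_trans (pvInner_le P t _) ?_
      rw [if_pos hP]; exact min_le_right _ _
    · exact ih _ hmem'

theorem pvInner_achieve (P : Int × (String × String) → Bool) (l : List (Int × (String × String)))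
    (b : Int) : pvInner P l b = b ∨ ∃ kp ∈ l, P kp = true ∧ pvInner P l b = kp.1 := by
  induction l generalizing b with
  | nil => exact Or.inl rfl
  | cons a t ih =>
    have hstep : pvInner P (a :: t) b = pvInner P t (if P a = true then min b a.1 else b) := rfl
    rw [hstep]
    rcases ih (if P a = true then min b a.1 else b) with h | ⟨kp, hmem, hP, hval⟩
    · by_cases hPa : P a = true
      · rw [if_pos hPa] at h ⊢
        rcases le_total b a.1 with hle | hle
        · exact Or.inl (h.trans (min_eq_left hle))
        · exact Or.inr ⟨a, List.mem_cons_self, hPa, h.trans (min_eq_right hle)⟩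
      · rw [if_neg hPa] at h ⊢
        exact Or.inl h
    · exact Or.inr ⟨kp, List.mem_cons_of_mem _ hmem, hP, hval⟩

-- the outer fold, as a plain min-fold
def pvMinFold (g : Nat → Int) (li : List Nat) (b : Int) : Int :=
  li.foldl (fun b i => min b (g i)) b

theorem pvMinFold_le (g : Nat → Int) (li : List Nat) (b : Int) : pvMinFold g li b ≤ b := by
  induction li generalizing b with
  | nil => exact le_refl b
  | cons i t ih =>
    simp only [pvMinFold, List.foldl_cons]
    exact le_trans (ih _) (min_le_left _ _)

theorem pvMinFold_le_of_mem (g : Nat → Int) (li : List Nat) (b : Int) (j : Nat)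
    (hmem : j ∈ li) : pvMinFold g li b ≤ g j := by
  induction li generalizing b with
  | nil => cases hmem
  | cons i t ih =>
    simp only [pvMinFold, List.foldl_cons]
    rcases List.mem_cons.mp hmem with rfl | hmem'
    · exact le_trans (pvMinFold_le g t _) (min_le_right _ _)
    · exact ih _ hmem'

theorem pvMinFold_achieve (g : Nat → Int) (li : List Nat) (b : Int) :
    pvMinFold g li b = b ∨ ∃ j ∈ li, pvMinFold g li b = g j := by
  induction li generalizing b with
  | nil => exact Or.inl rfl
  | cons i t ih =>
    simp only [pvMinFold, List.foldl_cons]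
    rcases ih (min b (g i)) with h | ⟨j, hmem, hval⟩
    · rcases le_total b (g i) with hle | hle
      · exact Or.inl (h.trans (min_eq_left hle))
      · exact Or.inr ⟨i, List.mem_cons_self, h.trans (min_eq_right hle)⟩
    · exact Or.inr ⟨j, List.mem_cons_of_mem _ hmem, hval⟩

theorem pvBest_eq_minFold (tl : List Char) :
    pvBest tl =
      pvMinFold (fun i => pvInner (pvP tl i) (PySem.List.enumerate pvPatterns) 10)
        (List.range tl.length) 10 := by
  have key : ∀ (li : List Nat) (b : Int), b ≤ 10 →
      li.foldl (fun b i => pvInner (pvP tl i) (PySem.List.enumerate pvPatterns) b) b =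
      pvMinFold (fun i => pvInner (pvP tl i) (PySem.List.enumerate pvPatterns) 10) li b := by
    intro li
    induction li with
    | nil => intro b _; rfl
    | cons i t ih =>
      intro b hb
      simp only [pvMinFold, List.foldl_cons]
      have h1 : pvInner (pvP tl i) (PySem.List.enumerate pvPatterns) b =
          min b (pvInner (pvP tl i) (PySem.List.enumerate pvPatterns) 10) := by
        conv_lhs => rw [← min_eq_left hb]
        exact pvInner_min _ _ b 10
      rw [h1]
      exact ih _ (le_trans (min_le_left _ _) hb)
  exact key (List.range tl.length) 10 (le_refl 10)

-- a matched pattern gives an upper bound on the scan result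
theorem pvBest_le_key (tl : List Char) (k : Int) (p lab : String)
    (hmem : (k, (p, lab)) ∈ PySem.List.enumerate pvPatterns)
    (hp : p.toList ≠ [])
    (hin : PySem.Chars.isIn p.toList tl = true) :
    pvBest tl ≤ k := by
  obtain ⟨j, hj⟩ := (PySem.Chars.exists_prefix_drop_iff_isIn p.toList tl).mpr hin
  have hjlt : j < tl.length := by
    by_contra hge
    have : tl.drop j = [] := List.drop_eq_nil_of_le (le_of_not_gt (fun h => hge h))
    rw [this] at hj
    exact hp (List.prefix_nil.mp hj)
  rw [pvBest_eq_minFold]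
  refine le_trans (pvMinFold_le_of_mem _ _ _ j (List.mem_range.mpr hjlt)) ?_
  refine pvInner_le_of_mem _ _ _ (k, (p, lab)) hmem ?_
  exact (PySem.Chars.startswith_iff _ _).mpr hj

theorem flag_of_startswith (tl : List Char) (j k : Nat) (hk : k < pvPatterns.length)
    (hsw : PySem.Chars.startswith (tl.drop j) (pvPatterns[k].1.toList) = true) :
    pvFlag tl k = true := by
  have hpre := (PySem.Chars.startswith_iff _ _).mp hsw
  have hin := (PySem.Chars.exists_prefix_drop_iff_isIn _ tl).mp ⟨j, hpre⟩
  simp [pvFlag, List.getElem?_eq_getElem hk, hin]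

-- lower bound: every matched flag bounds pvBest
theorem pvBest_le_flag (tl : List Char) (k : Nat) (hk : k < 10) (hf : pvFlag tl k = true) :
    pvBest tl ≤ (k : Int) := by
  interval_cases k <;>
    [ exact pvBest_le_key tl 0 "dizzy" "dizziness" (by decide) (by decide)
        (by simpa [pvFlag, pvPatterns] using hf);
      exact pvBest_le_key tl 1 "dizziness" "dizziness" (by decide) (by decide)
        (by simpa [pvFlag, pvPatterns] using hf);
      exact pvBest_le_key tl 2 "chest pain" "chest pain" (by decide) (by decide)
        (by simpa [pvFlag, pvPatterns] using hf);
      exact pvBest_le_key tl 3 "head" "headache" (by decide) (by decide)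
        (by simpa [pvFlag, pvPatterns] using hf);
      exact pvBest_le_key tl 4 "shortness of breath" "shortness of breath" (by decide) (by decide)
        (by simpa [pvFlag, pvPatterns] using hf);
      exact pvBest_le_key tl 5 "nausea" "nausea" (by decide) (by decide)
        (by simpa [pvFlag, pvPatterns] using hf);
      exact pvBest_le_key tl 6 "fatigue" "fatigue" (by decide) (by decide)
        (by simpa [pvFlag, pvPatterns] using hf);
      exact pvBest_le_key tl 7 "fever" "fever" (by decide) (by decide)
        (by simpa [pvFlag, pvPatterns] using hf);
      exact pvBest_le_key tl 8 "cough" "cough" (by decide) (by decide)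
        (by simpa [pvFlag, pvPatterns] using hf);
      exact pvBest_le_key tl 9 "abdominal pain" "abdominal pain" (by decide) (by decide)
        (by simpa [pvFlag, pvPatterns] using hf)]

-- pvBest is either the sentinel or an achieved, matched priority
theorem pvBest_achieve (tl : List Char) :
    pvBest tl = 10 ∨ ∃ k : Nat, k < 10 ∧ pvBest tl = (k : Int) ∧ pvFlag tl k = true := by
  rw [pvBest_eq_minFold]
  rcases pvMinFold_achieve (fun i => pvInner (pvP tl i) (PySem.List.enumerate pvPatterns) 10)
      (List.range tl.length) 10 with h | ⟨j, _, hval⟩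
  · exact Or.inl h
  · rcases pvInner_achieve (pvP tl j) (PySem.List.enumerate pvPatterns) 10 with h10 | ⟨kp, hmem, hP, hkp⟩
    · exact Or.inl (hval.trans h10)
    · obtain ⟨k, hk, hkp_eq⟩ := (PySem.List.mem_enumerate_iff _ _ _).mp hmem
      refine Or.inr ⟨k, ?_, ?_, ?_⟩
      · simpa [pvPatterns] using hk
      · rw [hval, hkp, hkp_eq]; simp
      · subst hkp_eq
        exact flag_of_startswith tl j k hk (by simpa [pvP] using hP)

theorem chain_of_least (tl : List Char) (k : Nat) (hk : k < 10)
    (hfk : pvFlag tl k = true) (hmin : ∀ j, j < k → pvFlag tl j = false) :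
    pvChain tl = ((pvPatterns[k]?).map Prod.snd).getD "fatigue" := by
  interval_cases k <;> simp_all [pvChain, pvPatterns]

theorem chain_of_none (tl : List Char) (hall : ∀ j, j < 10 → pvFlag tl j = false) :
    pvChain tl = "fatigue" := by
  simp [pvChain, hall]

theorem b_eq_chain (s : String) : extract_primary_symptom_py_alt s = pvChain (PySem.Chars.lower s.toList) := by
  set tl := PySem.Chars.lower s.toList with htl
  have halt : extract_primary_symptom_py_alt s =
      (if pvBest tl < (pvPatterns.length : Int) then
        ((PySem.List.pyGet? pvPatterns (pvBest tl)).map Prod.snd).getD "fatigue"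
      else "fatigue") := by
    simp only [extract_primary_symptom_py_alt, pvBest, pvInner, pvP, htl]
  rw [halt]
  have hlen : (pvPatterns.length : Int) = 10 := by decide
  rcases pvBest_achieve tl with h10 | ⟨k, hk, hbk, hfk⟩
  · rw [if_neg (by rw [hlen, h10]; exact lt_irrefl _)]
    have hall : ∀ j, j < 10 → pvFlag tl j = false := by
      intro j hj
      by_contra hne
      have := pvBest_le_flag tl j hj (by simpa using Bool.not_eq_false _ ▸ (eq_true_of_ne_false hne))
      rw [h10] at this
      omega
    exact (chain_of_none tl hall).symm
  · have hmin : ∀ j, j < k → pvFlag tl j = false := by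
      intro j hj
      by_contra hne
      have hjf : pvFlag tl j = true := by
        cases hb : pvFlag tl j with
        | false => exact absurd hb hne
        | true => rfl
      have := pvBest_le_flag tl j (by omega) hjf
      rw [hbk] at this
      have : (k : Int) ≤ (j : Int) := this
      omega
    rw [if_pos (by rw [hlen, hbk]; exact_mod_cast hk), hbk]
    rw [chain_of_least tl k hk hfk hmin]
    simp [PySem.List.pyGet?_natCast]

-- ===== VERDICT (by name: the statement is the Claim_ definition above) =====
theorem extract_primary_symptom_py_spec : Claim_equal_extract_primary_symptom_py := by
  intro s _
  unfold Spec_extract_primary_symptom_py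
  rw [a_eq_chain, b_eq_chain]
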